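-- pv_equiv track=rewrite | github.com/Shenia/daily_byte_exercises | 11_self_divisible.py | self_divisible_memoized
-- ===== SOURCE A (Python) =====
-- def self_divisible_helper(number):
--     for letter in str(number): #string of length log_10 n
--         if letter == "0":
--             return False
--         if number % int(letter) != 0:
--             return False
--     return True
--
-- def self_divisible_memoized(n):
--     def self_divisible_memoized_helper(n, memo):
--         if n == 1:
--             memo[1] = 0
--             return memo
--         else:
--             if (self_divisible_helper(n-1)):
--                 memo[n] = memo[n-1] + 1
--                 return memo
--             else:
--                 memo[n] = memo[n-1]
--                 return memo
--     retVal = 0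
--     memo = {}
--     for number in range(1, n+1):
--         memo = self_divisible_memoized_helper(number, memo)
--     return memo[n]
-- ===== SOURCE B (Python) =====
-- def self_divisible_memoized(n):
--     # One arithmetic pass: count k in 1..n-1 whose digits are all nonzero and divide k.
--     count = 0
--     for k in range(1, n):
--         m = k
--         while m:
--             m, d = divmod(m, 10)
--             if d == 0 or k % d:
--                 break
--         else:
--             count += 1
--     return count
-- ===== Notes on version B (the rewrite author's own statement) =====
-- stated objective: faster
-- what changed: Replaced A's memo-dict recurrence (one dict entry per number, digits read via str()/int()) by a single arithmetic counting loop that extracts digits with divmod, keeping only an integer counter.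
-- outside the precondition, e.g. on self_divisible_memoized(0): A raises KeyError, B returns 0
import Mathlib
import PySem

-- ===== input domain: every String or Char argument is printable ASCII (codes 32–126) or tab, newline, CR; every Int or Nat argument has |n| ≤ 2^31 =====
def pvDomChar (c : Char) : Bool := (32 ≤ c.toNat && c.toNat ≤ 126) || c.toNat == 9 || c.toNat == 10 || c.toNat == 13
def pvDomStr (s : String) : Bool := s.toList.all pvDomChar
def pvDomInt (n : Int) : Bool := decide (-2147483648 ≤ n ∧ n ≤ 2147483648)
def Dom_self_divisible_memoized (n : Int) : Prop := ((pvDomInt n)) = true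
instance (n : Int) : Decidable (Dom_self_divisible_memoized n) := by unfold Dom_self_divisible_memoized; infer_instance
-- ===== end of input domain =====

-- B replaces A's memo-dict recurrence by one arithmetic counting loop (digits via divmod);
-- measurably faster by a constant factor and O(1) extra space.


-- ===== PORT A =====
-- the 'for letter in str(number)' loop of self_divisible_helper, with its two early returns
def selfDivisibleHelperLoop (number : Int) : List Char → Bool
  | [] => true
  | letter :: rest =>
    if letter == '0' then false
    else
      match PySem.Int.ofStr? (String.ofList [letter]) with
      | none => false   -- int(letter) raises ValueError; unreachable: number ≥ 0 wherever A calls this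
      | some d => if PySem.Int.mod number d ≠ 0 then false else selfDivisibleHelperLoop number rest

def selfDivisibleHelper (number : Int) : Bool :=
  selfDivisibleHelperLoop number (PySem.Int.toStr number).toList

-- the inner function self_divisible_memoized_helper(n, memo)
def selfDivisibleMemoStep (n : Int) (memo : PySem.Dict Int Int) : PySem.Dict Int Int :=
  if n = 1 then memo.insert 1 0
  else
    if selfDivisibleHelper (n - 1) then
      memo.insert n ((memo.get? (n - 1)).getD 0 + 1)   -- memo[n-1] is always present here
    else
      memo.insert n ((memo.get? (n - 1)).getD 0)

def self_divisible_memoized (n : Int) : Int :=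
  (((PySem.List.pyRange 1 (n + 1) 1).foldl
      (fun memo number => selfDivisibleMemoStep number memo) PySem.Dict.empty).get? n).getD 0
  -- final 'return memo[n]': KeyError when n < 1, excluded by Pre_

-- ===== PORT B =====
-- the 'while m: m, d = divmod(m, 10) …' digit loop of Source B; k ≥ 1 in the outer loop, so
-- divmod on these nonnegative ints is exactly Nat division/mod
def altDigitLoop (m : Nat) (k : Int) : Bool :=
  if m = 0 then true
  else
    let d := m % 10
    if d = 0 ∨ PySem.Int.mod k (d : Int) ≠ 0 then false
    else altDigitLoop (m / 10) k
decreasing_by exact Nat.div_lt_self (Nat.pos_of_ne_zero (by assumption)) (by omega)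

def self_divisible_memoized_alt (n : Int) : Int :=
  (PySem.List.pyRange 1 n 1).foldl (fun count k => if altDigitLoop k.toNat k then count + 1 else count) 0

-- ===== PRECONDITION & SPEC =====
-- Pre_ excludes n ≤ 0: there A raises KeyError (memo[n] was never written)
def Pre_self_divisible_memoized (n : Int) : Prop := 1 ≤ n
instance (n : Int) : Decidable (Pre_self_divisible_memoized n) := by unfold Pre_self_divisible_memoized; infer_instance
def pvWitness_self_divisible_memoized : Int := (13)

def Spec_self_divisible_memoized (n : Int) (out : Int) : Prop := out = self_divisible_memoized_alt n
instance (n : Int) (out : Int) : Decidable (Spec_self_divisible_memoized n out) := by unfold Spec_self_divisible_memoized; infer_instance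

-- ===== CLAIM (what is proved, stated in full; the proofs are below) =====
def Claim_equal_self_divisible_memoized : Prop := ∀ (n : Int), Dom_self_divisible_memoized n → Pre_self_divisible_memoized n → Spec_self_divisible_memoized n (self_divisible_memoized n)

-- ===== LEMMAS AND PROOFS =====

-- the per-letter test A's loop applies
def letterOk (number : Int) (c : Char) : Bool :=
  !(c == '0') &&
    (match PySem.Int.ofStr? (String.ofList [c]) with
     | none => false
     | some d => !(PySem.Int.mod number d ≠ 0 : Bool))

lemma helperLoop_eq_all (number : Int) (l : List Char) :
    selfDivisibleHelperLoop number l = l.all (letterOk number) := by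
  induction l with
  | nil => rfl
  | cons c rest ih =>
    simp only [selfDivisibleHelperLoop, List.all_cons, letterOk]
    rcases h : PySem.Int.ofStr? (String.ofList [c]) with _ | d <;>
      by_cases hc : c == '0'
    · simp [hc]
    · simp [hc]
    · simp [hc]
    · by_cases hm : PySem.Int.mod number d = 0
      · simp [hc, hm, ih]
      · simp [hc, hm]

lemma ofStr?_digitChar (d : Nat) (hd : d < 10) :
    PySem.Int.ofStr? (String.ofList [Nat.digitChar d]) = some (d : Int) := by
  interval_cases d <;> decide

lemma digitChar_beq_zero (d : Nat) (hd : d < 10) :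
    (Nat.digitChar d == '0') = decide (d = 0) := by
  interval_cases d <;> decide

lemma letterOk_digitChar (k : Int) (d : Nat) (hd : d < 10) :
    letterOk k (Nat.digitChar d) =
      (decide (d ≠ 0) && decide (PySem.Int.mod k (d : Int) = 0)) := by
  simp only [letterOk, ofStr?_digitChar d hd, digitChar_beq_zero d hd]
  by_cases hz : d = 0 <;> by_cases hm : PySem.Int.mod k (d : Int) = 0 <;> simp [hz, hm]

lemma altDigitLoop_zero (k : Int) : altDigitLoop 0 k = true := by
  rw [altDigitLoop]; simp

lemma altDigitLoop_pos (m : Nat) (k : Int) (hm : m ≠ 0) :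
    altDigitLoop m k
      = (decide (m % 10 ≠ 0) && decide (PySem.Int.mod k ((m : Int) % 10) = 0)
          && altDigitLoop (m / 10) k) := by
  rw [altDigitLoop, if_neg hm]
  push_cast
  by_cases hz : m % 10 = 0
  · simp [hz]
  · by_cases hmod : PySem.Int.mod k ((m : Int) % 10) = 0 <;> simp [hz, hmod]

lemma toDigitsCore_succ (f n : Nat) (ds : List Char) :
    Nat.toDigitsCore 10 (f + 1) n ds
      = if n / 10 = 0 then (n % 10).digitChar :: ds
        else Nat.toDigitsCore 10 f (n / 10) ((n % 10).digitChar :: ds) := rfl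

lemma toDigitsCore_all_eq (k : Int) :
    ∀ (f m : Nat) (acc : List Char), 0 < m → m < f →
      (Nat.toDigitsCore 10 f m acc).all (letterOk k)
        = (altDigitLoop m k && acc.all (letterOk k)) := by
  intro f
  induction f with
  | zero => intro m acc h1 h2; omega
  | succ f ih =>
    intro m acc hm hf
    have hd10 : m % 10 < 10 := Nat.mod_lt _ (by omega)
    rw [toDigitsCore_succ, altDigitLoop_pos m k (by omega)]
    by_cases hq : m / 10 = 0
    · rw [if_pos hq, hq, altDigitLoop_zero, List.all_cons, letterOk_digitChar k _ hd10]
      simp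
      rfl
    · rw [if_neg hq,
          ih (m / 10) ((m % 10).digitChar :: acc) (Nat.pos_of_ne_zero hq)
            (by have h10 : m / 10 < m := Nat.div_lt_self hm (by omega); omega),
          List.all_cons, letterOk_digitChar k _ hd10]
      simp [Bool.and_comm, Bool.and_left_comm]
      rfl

lemma helper_eq_altDigitLoop (j : Int) (hj : 1 ≤ j) :
    selfDivisibleHelper j = altDigitLoop j.toNat j := by
  have hneg : ¬ j < 0 := by omega
  rw [selfDivisibleHelper, PySem.Int.toList_toStr, helperLoop_eq_all,
      PySem.Int.toChars, if_neg hneg, Nat.toDigits,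
      toDigitsCore_all_eq j (j.toNat + 1) j.toNat [] (by omega) (by omega)]
  simp

-- the invariant of A's memo loop: after processing 1..m+1, memo[m+1] holds B's count over 1..m
lemma memo_invariant (m : Nat) :
    ((PySem.List.pyRange 1 ((1 + m : Int) + 1) 1).foldl
        (fun memo number => selfDivisibleMemoStep number memo) PySem.Dict.empty).get? (1 + m)
      = some (self_divisible_memoized_alt (1 + m)) := by
  induction m with
  | zero =>
    simp only [Nat.cast_zero, add_zero]
    rw [PySem.List.pyRange_one_singleton]
    simp [selfDivisibleMemoStep, self_divisible_memoized_alt, PySem.List.pyRange_one_eq_nil,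
      PySem.Dict.get?_insert_self]
  | succ m ih =>
    rw [show ((1 + (m + 1 : Nat)) : Int) = 1 + (m:Int) + 1 from by push_cast; ring,
        PySem.List.pyRange_one_succ_right (by omega), List.foldl_append]
    simp only [List.foldl_cons, List.foldl_nil]
    rw [selfDivisibleMemoStep]
    have harg : (1 + (m:Int) + 1) - 1 = 1 + m := by ring
    have hB : self_divisible_memoized_alt (1 + (m:Int) + 1)
        = (if altDigitLoop (1 + (m:Int)).toNat (1 + m) then self_divisible_memoized_alt (1 + m) + 1
           else self_divisible_memoized_alt (1 + m)) := by
      rw [self_divisible_memoized_alt,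
          PySem.List.pyRange_one_succ_right (by omega), List.foldl_append]
      rfl
    rw [if_neg (by omega), harg, ih]
    by_cases hdiv : selfDivisibleHelper (1 + (m:Int))
    · rw [if_pos hdiv, PySem.Dict.get?_insert_self]
      rw [helper_eq_altDigitLoop _ (by omega)] at hdiv
      rw [hB, if_pos hdiv]
      rfl
    · rw [if_neg hdiv, PySem.Dict.get?_insert_self]
      rw [helper_eq_altDigitLoop _ (by omega)] at hdiv
      rw [hB, if_neg (by simpa using hdiv)]
      rfl

-- ===== VERDICT (by name: the statement is the Claim_ definition above) =====
theorem self_divisible_memoized_spec : Claim_equal_self_divisible_memoized := by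
  intro n _ hpre
  have hn : n = 1 + ((n - 1).toNat : Int) := by
    unfold Pre_self_divisible_memoized at hpre; omega
  unfold Spec_self_divisible_memoized self_divisible_memoized
  rw [hn, memo_invariant]
  rfl
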